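-- pv_equiv track=rewrite | github.com/deszczowy/experimentalist | Experimentalist/action/dynamicpan.py | _apply
-- ===== SOURCE A (Python) =====
-- def _apply(arr, coefs):
--     values = []
--     i = 0
--     length = len(coefs)
--
--     for x in arr:
--
--         if i == length:
--             i = 0
--
--         values.append(x * coefs[i])
--         i += 1
--     return values
-- ===== SOURCE B (Python) =====
-- def _apply(arr, coefs):
--     if not arr:
--         return []
--     reps = -(-len(arr) // len(coefs))
--     tiled = (coefs * reps)[:len(arr)]
--     return [x * c for x, c in zip(arr, tiled)]
-- ===== Notes on version B (the rewrite author's own statement) =====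
-- stated objective: alternative
-- what changed: Replaces the hand-maintained cyclic counter with its reset branch by a materialized repeated-coefficient table (coefs tiled ceil(len(arr)/len(coefs)) times, truncated to len(arr)) consumed by a flat zip pass.
import Mathlib
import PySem

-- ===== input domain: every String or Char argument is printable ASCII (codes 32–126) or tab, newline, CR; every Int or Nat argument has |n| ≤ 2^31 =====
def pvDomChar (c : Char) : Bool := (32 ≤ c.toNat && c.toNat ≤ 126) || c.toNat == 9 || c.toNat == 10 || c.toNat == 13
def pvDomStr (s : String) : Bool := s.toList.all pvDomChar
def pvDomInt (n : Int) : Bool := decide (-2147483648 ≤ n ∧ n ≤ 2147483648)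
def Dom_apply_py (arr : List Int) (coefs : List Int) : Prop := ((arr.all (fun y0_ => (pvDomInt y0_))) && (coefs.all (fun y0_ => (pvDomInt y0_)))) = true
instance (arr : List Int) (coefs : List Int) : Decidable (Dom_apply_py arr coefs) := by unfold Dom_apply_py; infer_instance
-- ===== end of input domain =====

-- B replaces A's hand-maintained cyclic counter (with its reset branch) by a materialized
-- repeated-coefficient table plus one flat enumerate pass (objective: alternative decomposition).

-- ===== PORT A =====
-- loop 'for x in arr' with accumulator i; coefs[i] is ported as pyGet? with default 0 —
-- Pre_apply_py guarantees the index is always in range, so the default is never used.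
def applyLoopA (coefs : List Int) (length : Nat) : List Int → Nat → List Int
  | [], _ => []
  | x :: xs, i =>
    let i' := if i == length then 0 else i
    x * ((PySem.List.pyGet? coefs (i' : Int)).getD 0) :: applyLoopA coefs length xs (i' + 1)

def apply_py (arr : List Int) (coefs : List Int) : List Int :=
  applyLoopA coefs coefs.length arr 0

-- ===== PORT B =====
def apply_py_alt (arr : List Int) (coefs : List Int) : List Int :=
  if arr = [] then []
  else
    -- reps = -(-len(arr) // len(coefs)); tiled = (coefs * reps)[:len(arr)]
    (arr.zip (PySem.List.slice
        (PySem.List.pyRepeat coefs (-(PySem.Int.floordiv (-(arr.length : Int)) (coefs.length : Int))))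
        none (some (arr.length : Int)))).map (fun p => p.1 * p.2)

-- ===== PRECONDITION & SPEC =====
-- Pre_ excludes exactly the inputs where A raises IndexError (non-empty arr with empty coefs);
-- B raises there too (indexing the empty tiled table).
def Pre_apply_py (arr : List Int) (coefs : List Int) : Prop := coefs ≠ [] ∨ arr = []
instance (arr : List Int) (coefs : List Int) : Decidable (Pre_apply_py arr coefs) := by unfold Pre_apply_py; infer_instance
def pvWitness_apply_py : List Int × List Int := ([3, 4, 5], [2, 10])

def Spec_apply_py (arr : List Int) (coefs : List Int) (out : List Int) : Prop := out = apply_py_alt arr coefs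
instance (arr : List Int) (coefs : List Int) (out : List Int) : Decidable (Spec_apply_py arr coefs out) := by unfold Spec_apply_py; infer_instance

-- ===== CLAIM (what is proved, stated in full; the proofs are below) =====
def Claim_equal_apply_py : Prop := ∀ (arr : List Int) (coefs : List Int), Dom_apply_py arr coefs → Pre_apply_py arr coefs → Spec_apply_py arr coefs (apply_py arr coefs)

-- ===== LEMMAS AND PROOFS =====

-- A's loop, started at counter i ≤ len(coefs), multiplies position j by coefs[(i + j) % len(coefs)].
theorem applyLoopA_eq (coefs : List Int) (hL : coefs ≠ []) :
    ∀ (xs : List Int) (i : Nat), i ≤ coefs.length →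
      applyLoopA coefs coefs.length xs i
        = xs.mapIdx (fun j x => x * coefs.getD ((i % coefs.length + j) % coefs.length) 0) := by
  intro xs
  induction xs with
  | nil => intro i _; simp [applyLoopA]
  | cons x xs ih =>
    intro i hi
    have hLpos : 0 < coefs.length := List.length_pos_iff.mpr hL
    have hi' : (if i == coefs.length then 0 else i) = i % coefs.length := by
      rcases Nat.lt_or_ge i coefs.length with h | h
      · simp [Nat.ne_of_lt h, Nat.mod_eq_of_lt h]
      · have : i = coefs.length := le_antisymm hi h
        simp [this]
    have hlt : i % coefs.length < coefs.length := Nat.mod_lt _ hLpos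
    rw [applyLoopA]
    simp only [hi']
    rw [ih (i % coefs.length + 1) (by omega), List.mapIdx_cons]
    refine congrArg₂ List.cons ?_ ?_
    · rw [PySem.List.pyGet?_ofNat coefs _ hlt]
      simp only [Option.getD_some, Nat.add_zero]
      rw [Nat.mod_eq_of_lt (Nat.mod_lt _ hLpos), List.getD_eq_getElem _ _ hlt]
    · refine congrFun (congrArg List.mapIdx (funext fun j => funext fun y => ?_)) xs
      have : (i % coefs.length + 1) % coefs.length + j
          ≡ i % coefs.length + (j + 1) [MOD coefs.length] := by
        unfold Nat.ModEq
        rw [Nat.mod_add_mod]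
        congr 1
        omega
      rw [this]

-- the tiled table agrees with cyclic indexing below n * len(coefs)
theorem getD_flatten_replicate (coefs : List Int) :
    ∀ (n j : Nat), j < n * coefs.length →
      ((List.replicate n coefs).flatten).getD j 0 = coefs.getD (j % coefs.length) 0 := by
  intro n
  induction n with
  | zero => intro j hj; simp at hj
  | succ n ih =>
    intro j hj
    rw [Nat.succ_mul] at hj
    rw [List.replicate_succ, List.flatten_cons]
    rcases Nat.lt_or_ge j coefs.length with h | h
    · rw [List.getD_append _ _ _ _ h, Nat.mod_eq_of_lt h]
    · rw [List.getD_append_right _ _ _ _ h, ih (j - coefs.length) (by omega)]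
      congr 1
      conv_rhs => rw [← Nat.sub_add_cancel h, Nat.add_mod_right]

-- B computes the same cyclic mapIdx form
theorem apply_py_alt_eq (arr coefs : List Int) (hL : coefs ≠ []) :
    apply_py_alt arr coefs
      = arr.mapIdx (fun j x => x * coefs.getD (j % coefs.length) 0) := by
  have hLpos : 0 < coefs.length := List.length_pos_iff.mpr hL
  unfold apply_py_alt
  by_cases ha : arr = []
  · simp [ha]
  rw [if_neg ha]
  have hnpos : 0 < arr.length := List.length_pos_iff.mpr ha
  set reps := -(PySem.Int.floordiv (-(arr.length : Int)) (coefs.length : Int)) with hreps_def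
  have hceil : (arr.length : Int) ≤ (coefs.length : Int) * reps := by
    have h : (coefs.length : Int) * ((-(arr.length : Int)).fdiv (coefs.length : Int))
        ≤ -(arr.length : Int) :=
      Int.mul_fdiv_self_le (by exact_mod_cast hLpos)
    rw [hreps_def]
    unfold PySem.Int.floordiv
    linarith
  have hrepsnn : 0 ≤ reps := by nlinarith [hceil, (by exact_mod_cast hLpos : (0:Int) < (coefs.length : Int)), (by exact_mod_cast hnpos : (0:Int) < (arr.length : Int))]
  have hceilNat : arr.length ≤ reps.toNat * coefs.length := by
    have : (arr.length : Int) ≤ ((reps.toNat * coefs.length : Nat) : Int) := by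
      push_cast [Int.toNat_of_nonneg hrepsnn]
      linarith
    exact_mod_cast this
  have htiled : PySem.List.slice (PySem.List.pyRepeat coefs reps) none (some (arr.length : Int))
      = List.take arr.length ((List.replicate reps.toNat coefs).flatten) := by
    rw [PySem.List.slice_to _ (by positivity)]
    simp [PySem.List.pyRepeat]
  have hflatlen : ((List.replicate reps.toNat coefs).flatten).length = reps.toNat * coefs.length := by
    simp [List.length_flatten, List.map_replicate, List.sum_replicate, smul_eq_mul]
  rw [htiled]
  apply List.ext_getElem
  · simp [List.length_zip, List.length_take, hflatlen]
    omega
  · intro j h1 h2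
    have hj : j < arr.length := by
      simp [List.length_zip, List.length_take, hflatlen] at h1
      omega
    have hjf : j < ((List.replicate reps.toNat coefs).flatten).length := by omega
    simp only [List.getElem_map, List.getElem_zip, List.getElem_take, List.getElem_mapIdx]
    congr 1
    rw [← List.getD_eq_getElem _ 0 hjf,
      getD_flatten_replicate coefs reps.toNat j (by omega),
      List.getD_eq_getElem _ 0 (Nat.mod_lt _ hLpos)]

-- ===== VERDICT (by name: the statement is the Claim_ definition above) =====
theorem apply_py_spec : Claim_equal_apply_py := by
  intro arr coefs _ hpre
  unfold Spec_apply_py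
  rcases hpre with hL | harr
  · rw [apply_py_alt_eq arr coefs hL]
    unfold apply_py
    rw [applyLoopA_eq coefs hL arr 0 (Nat.zero_le _)]
    simp
  · subst harr
    simp [apply_py, applyLoopA, apply_py_alt]
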